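-- pv_equiv track=rewrite | github.com/jlederer1/DKST | dkst/utils/set_operations.py | intersection_closure
-- ===== SOURCE A (Python) =====
-- def intersection_closure(sets):
--     """
--     Compute the intersection closure of a given set of string subsets.
--
--     The intersection closure of a set is the smallest intersection-closed set containing all original subsets.
--
--     :param sets: A list of subsets represented as strings.
--     :type sets: list[str]
--     :return: The intersection-closed set containing all possible intersections of subsets.
--     :rtype: list[str]
--     """
--     if not sets:  # If the input is empty, return an empty list
--         return []
--
--     closure = set(sets)
--     added = True
--
--     while added:
--         added = False
--         new_elements = set()
--
--         for set1 in closure: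
--             for set2 in closure:
--                 intersection_set = ''.join(sorted(set(set1) & set(set2)))
--                 if intersection_set not in closure:
--                     new_elements.add(intersection_set)
--                     added = True
--
--         closure.update(new_elements)
--
--     sorted_K = sort_K(closure)
--     if sorted_K[0] != '':
--         sorted_K.insert(0, '')   # the closure of any family of sets always includes the empty set
--
--     return sorted_K
--
-- def sort_K(sets):
--     """
--     Sorts a given set or list of strings by length and alphabetically and returns the sorted knowledge structure as list.
--     Induces the same order as sort_K_binary() for the corresponding knowledge structure in binary matrix notation.
--
--     :param sets: A list of strings representing knowledge states.
--     :type sets: list[str]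
--     :return: A sorted list of strings representing knowledge states.
--     :rtype: list[str]
--     """
--     # check for knowledge structure vs quasiorder
--     # to do #
--
--     # sorts list of strings a) by length b) alphabetically like ""<"a"<"b"<"c"<"ab"<"ac"<"bc"<"abc"<"<pad>"
--     sorted_states = sorted(sets, key=lambda x: (len(x), x))
--     return sorted_states
-- ===== SOURCE B (Python) =====
-- def intersection_closure(sets):
--     """Worklist intersection closure: each new state is intersected with the
--     already-closed collection exactly once, instead of re-intersecting all
--     pairs every round."""
--     if not sets:
--         return []
--
--     closed = set()  # intersection-closed set of normalized (sorted, deduped) states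
--     for s in sets:
--         f = ''.join(sorted(set(s)))
--         if f not in closed:
--             new = [''.join(sorted(set(f) & set(g))) for g in closed]
--             closed.add(f)
--             closed.update(new)
--
--     result = set(sets) | closed
--     out = sorted(result, key=lambda x: (len(x), x))
--     if '' not in result:
--         out.insert(0, '')
--     return out
-- ===== Notes on version B (the rewrite author's own statement) =====
-- stated objective: faster
-- what changed: A repeatedly re-intersects every pair of the whole closure until a round adds nothing; B does a single worklist pass that intersects each newly added normalized state with the already intersection-closed collection exactly once, exploiting that the closure of C ∪ {f} is C ∪ {f} ∪ {f∩g : g∈C} when C is already closed.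
import Mathlib
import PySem

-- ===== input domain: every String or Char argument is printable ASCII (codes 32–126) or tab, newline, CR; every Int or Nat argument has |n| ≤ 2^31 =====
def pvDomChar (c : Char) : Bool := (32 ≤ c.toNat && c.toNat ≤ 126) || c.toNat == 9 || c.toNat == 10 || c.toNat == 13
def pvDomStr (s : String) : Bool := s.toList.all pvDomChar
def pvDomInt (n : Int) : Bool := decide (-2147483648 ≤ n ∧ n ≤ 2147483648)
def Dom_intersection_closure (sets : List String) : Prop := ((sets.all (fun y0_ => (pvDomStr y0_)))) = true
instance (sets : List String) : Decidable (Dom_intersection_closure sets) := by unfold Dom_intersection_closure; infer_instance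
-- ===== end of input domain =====

-- B replaces A's repeat-until-stable rescan of all closure pairs by a one-pass worklist closure
-- (each new normalized state is intersected with the already-closed collection once): faster.

-- ===== PORT A =====
-- ''.join(sorted(set(set1) & set(set2)))
def pvInterA (set1 set2 : String) : String :=
  String.ofList (PySem.List.sorted
    (PySem.Set.inter (PySem.Set.ofList set1.toList) (PySem.Set.ofList set2.toList))
    (fun c => c) false)

-- one body of A's while loop: returns (new_elements, added)
def pvPassA (closure : PySem.Set String) : PySem.Set String × Bool :=
  closure.foldl (fun st set1 =>
    closure.foldl (fun st set2 =>
      let t := pvInterA set1 set2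
      if PySem.Set.contains closure t then st else (PySem.Set.add st.1 t, true))
      st)
    (PySem.Set.empty, false)

-- A's 'while added' loop; the fuel argument is only a termination guard
-- (proved sufficient below: the closure grows strictly while it fits in a finite candidate set)
def pvLoopA (fuel : Nat) (closure : PySem.Set String) : PySem.Set String :=
  match fuel with
  | 0 => closure
  | fuel + 1 =>
    let p := pvPassA closure
    let closure' := PySem.Set.update closure p.1
    if p.2 then pvLoopA fuel closure' else closure'

def intersection_closure (sets : List String) : List String :=
  if sets = [] then []
  else
    let fuel := sets.length + 2 ^ (PySem.Set.ofList (sets.flatMap String.toList)).length + 1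
    let closure := pvLoopA fuel (PySem.Set.ofList sets)
    let sortedK := PySem.List.sorted2 closure PySem.Str.len (fun x => x) false
    if PySem.List.pyGetD sortedK 0 "" ≠ "" then "" :: sortedK else sortedK

-- ===== PORT B =====
-- ''.join(sorted(set(s)))
def pvNormB (s : String) : String :=
  String.ofList (PySem.List.sorted (PySem.Set.ofList s.toList) (fun c => c) false)

-- ''.join(sorted(set(a) & set(b)))
def pvInterB (a b : String) : String :=
  String.ofList (PySem.List.sorted
    (PySem.Set.inter (PySem.Set.ofList a.toList) (PySem.Set.ofList b.toList))
    (fun c => c) false)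

-- body of B's worklist loop
def pvStepB (closed : PySem.Set String) (s : String) : PySem.Set String :=
  let f := pvNormB s
  if PySem.Set.contains closed f then closed
  else PySem.Set.update (PySem.Set.add closed f) (closed.map (fun g => pvInterB f g))

def intersection_closure_alt (sets : List String) : List String :=
  if sets = [] then []
  else
    let closed := sets.foldl pvStepB PySem.Set.empty
    let result := PySem.Set.union (PySem.Set.ofList sets) closed
    let out := PySem.List.sorted2 result PySem.Str.len (fun x => x) false
    if PySem.Set.contains result "" then out else "" :: out

-- ===== PRECONDITION & SPEC =====
def Spec_intersection_closure (sets : List String) (out : List String) : Prop := out = intersection_closure_alt sets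
instance (sets : List String) (out : List String) : Decidable (Spec_intersection_closure sets out) := by unfold Spec_intersection_closure; infer_instance

-- ===== CLAIM (what is proved, stated in full; the proofs are below) =====
def Claim_equal_intersection_closure : Prop := ∀ (sets : List String), Dom_intersection_closure sets → Spec_intersection_closure sets (intersection_closure sets)

-- ===== LEMMAS AND PROOFS =====

-- character set of a string
def pvChs (s : String) : Finset Char := s.toList.toFinset
-- a canonical (strictly sorted, hence duplicate-free) string
def pvCanon (s : String) : Prop := s.toList.Pairwise (· < ·)

lemma pvInterB_eq_pvInterA : pvInterB = pvInterA := rfl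

lemma pv_pairwise_lt_of_le_nodup {l : List Char} (h1 : l.Pairwise (· ≤ ·)) (h2 : l.Nodup) :
    l.Pairwise (· < ·) :=
  (h1.and h2).imp (fun h => lt_of_le_of_ne h.1 h.2)

lemma pvCanon_nodup {s : String} (h : pvCanon s) : s.toList.Nodup := h.imp ne_of_lt

lemma pv_mem_interA (a b : String) (c : Char) :
    c ∈ (pvInterA a b).toList ↔ c ∈ a.toList ∧ c ∈ b.toList := by
  simp [pvInterA, String.toList_ofList, PySem.List.mem_sorted, PySem.Set.mem_inter,
    PySem.Set.mem_ofList]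

lemma pv_canon_interA (a b : String) : pvCanon (pvInterA a b) := by
  unfold pvCanon pvInterA
  rw [String.toList_ofList]
  refine pv_pairwise_lt_of_le_nodup (PySem.List.sorted_pairwise _ _) ?_
  exact (PySem.List.sorted_perm _ _ _).nodup_iff.mpr
    ((PySem.Set.nodup_ofList a.toList).inter _)

lemma pv_mem_normB (s : String) (c : Char) : c ∈ (pvNormB s).toList ↔ c ∈ s.toList := by
  simp [pvNormB, String.toList_ofList, PySem.List.mem_sorted, PySem.Set.mem_ofList]

lemma pv_canon_normB (s : String) : pvCanon (pvNormB s) := by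
  unfold pvCanon pvNormB
  rw [String.toList_ofList]
  exact PySem.List.sorted_ofList_pairwise_lt _

lemma pv_chs_interA (a b : String) : pvChs (pvInterA a b) = pvChs a ∩ pvChs b := by
  ext c; simp [pvChs, pv_mem_interA]

lemma pv_chs_normB (s : String) : pvChs (pvNormB s) = pvChs s := by
  ext c; simp [pvChs, pv_mem_normB]

lemma pvCanonEq {x y : String} (hx : pvCanon x) (hy : pvCanon y) (h : pvChs x = pvChs y) :
    x = y := by
  have hm : ∀ c, c ∈ x.toList ↔ c ∈ y.toList := by
    intro c
    have := congrArg (c ∈ ·) h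
    simpa [pvChs] using this
  have hperm : x.toList.Perm y.toList :=
    (List.perm_ext_iff_of_nodup (pvCanon_nodup hx) (pvCanon_nodup hy)).mpr hm
  have hl : x.toList = y.toList :=
    List.Perm.eq_of_pairwise (le := (· < ·))
      (fun a b _ _ hab hba => absurd hba (lt_asymm hab)) hx hy hperm
  calc x = String.ofList x.toList := String.ofList_toList.symm
    _ = String.ofList y.toList := by rw [hl]
    _ = y := String.ofList_toList

lemma pv_interA_comm (a b : String) : pvInterA a b = pvInterA b a :=
  pvCanonEq (pv_canon_interA a b) (pv_canon_interA b a)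
    (by rw [pv_chs_interA, pv_chs_interA, Finset.inter_comm])

lemma pv_interA_self_of_canon {x : String} (hx : pvCanon x) : pvInterA x x = x :=
  pvCanonEq (pv_canon_interA x x) hx (by rw [pv_chs_interA, Finset.inter_self])

lemma pv_interA_norm_self (s : String) : pvInterA s s = pvNormB s :=
  pvCanonEq (pv_canon_interA s s) (pv_canon_normB s)
    (by rw [pv_chs_interA, pv_chs_normB, Finset.inter_self])

lemma pv_normB_canon_fix {x : String} (hx : pvCanon x) : pvNormB x = x :=
  pvCanonEq (pv_canon_normB x) hx (pv_chs_normB x)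

lemma pv_normB_interA (x y : String) :
    pvNormB (pvInterA x y) = pvInterA (pvNormB x) (pvNormB y) :=
  pvCanonEq (pv_canon_normB _) (pv_canon_interA _ _)
    (by rw [pv_chs_normB, pv_chs_interA, pv_chs_interA, pv_chs_normB, pv_chs_normB])

lemma pv_interA_rot1 (a f g : String) :
    pvInterA a (pvInterA f g) = pvInterA f (pvInterA a g) :=
  pvCanonEq (pv_canon_interA _ _) (pv_canon_interA _ _) (by
    ext c
    simp only [pv_chs_interA, Finset.mem_inter]
    tauto)

lemma pv_interA_absorb (f g : String) :
    pvInterA f (pvInterA f g) = pvInterA f g :=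
  pvCanonEq (pv_canon_interA _ _) (pv_canon_interA _ _) (by
    ext c
    simp only [pv_chs_interA, Finset.mem_inter]
    tauto)

lemma pv_interA_rot2 (f g b : String) :
    pvInterA (pvInterA f g) b = pvInterA f (pvInterA g b) :=
  pvCanonEq (pv_canon_interA _ _) (pv_canon_interA _ _) (by
    ext c
    simp only [pv_chs_interA, Finset.mem_inter]
    tauto)

lemma pv_interA_absorb2 (f g : String) :
    pvInterA (pvInterA f g) f = pvInterA f g :=
  pvCanonEq (pv_canon_interA _ _) (pv_canon_interA _ _) (by
    ext c
    simp only [pv_chs_interA, Finset.mem_inter]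
    tauto)

lemma pv_interA_dist (f g1 g2 : String) :
    pvInterA (pvInterA f g1) (pvInterA f g2) = pvInterA f (pvInterA g1 g2) :=
  pvCanonEq (pv_canon_interA _ _) (pv_canon_interA _ _) (by
    ext c
    simp only [pv_chs_interA, Finset.mem_inter]
    tauto)

-- everything derivable from `sets` by repeated pairwise intersection
inductive pvDer (sets : List String) : String → Prop where
  | base {s : String} : s ∈ sets → pvDer sets s
  | step {x y : String} : pvDer sets x → pvDer sets y → pvDer sets (pvInterA x y)

-- ---------- A side ----------

def pvInnerF (C : PySem.Set String) (s1 : String) :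
    PySem.Set String × Bool → String → PySem.Set String × Bool :=
  fun st s2 =>
    let t := pvInterA s1 s2
    if PySem.Set.contains C t then st else (PySem.Set.add st.1 t, true)

lemma pv_passA_eq (C : PySem.Set String) :
    pvPassA C = C.foldl (fun st s1 => C.foldl (pvInnerF C s1) st) (PySem.Set.empty, false) := rfl

lemma pv_innerF_mem (C : PySem.Set String) (s1 : String) :
    ∀ (l : List String) (st : PySem.Set String × Bool) (t : String),
      t ∈ (l.foldl (pvInnerF C s1) st).1 ↔
        t ∈ st.1 ∨ ∃ y ∈ l, t = pvInterA s1 y ∧ t ∉ C := by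
  intro l
  induction l with
  | nil => simp
  | cons y l ih =>
    intro st t
    rw [List.foldl_cons, ih]
    by_cases hc : pvInterA s1 y ∈ C
    · have hstep : pvInnerF C s1 st y = st := by
        simp [pvInnerF, hc]
      rw [hstep]
      constructor
      · rintro (h | ⟨z, hz, ht, hnc⟩)
        · exact .inl h
        · exact .inr ⟨z, List.mem_cons_of_mem _ hz, ht, hnc⟩
      · rintro (h | ⟨z, hz, ht, hnc⟩)
        · exact .inl h
        · rcases List.mem_cons.mp hz with rfl | hz
          · exact absurd (ht ▸ hc) hnc
          · exact .inr ⟨z, hz, ht, hnc⟩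
    · have hstep : pvInnerF C s1 st y = (PySem.Set.add st.1 (pvInterA s1 y), true) := by
        simp [pvInnerF, hc]
      rw [hstep]
      simp only [PySem.Set.mem_add]
      constructor
      · rintro ((h | rfl) | h)
        · exact .inl h
        · exact .inr ⟨y, List.mem_cons_self, rfl, hc⟩
        · rcases h with ⟨z, hz, ht, hnc⟩
          exact .inr ⟨z, List.mem_cons_of_mem _ hz, ht, hnc⟩
      · rintro (h | ⟨z, hz, ht, hnc⟩)
        · exact .inl (.inl h)
        · rcases List.mem_cons.mp hz with rfl | hz
          · exact .inl (.inr ht)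
          · exact .inr ⟨z, hz, ht, hnc⟩

lemma pv_innerF_flag (C : PySem.Set String) (s1 : String) :
    ∀ (l : List String) (st : PySem.Set String × Bool),
      (l.foldl (pvInnerF C s1) st).2 = true ↔
        st.2 = true ∨ ∃ y ∈ l, pvInterA s1 y ∉ C := by
  intro l
  induction l with
  | nil => simp
  | cons y l ih =>
    intro st
    rw [List.foldl_cons, ih]
    by_cases hc : pvInterA s1 y ∈ C
    · have hstep : pvInnerF C s1 st y = st := by
        simp [pvInnerF, hc]
      rw [hstep]
      constructor
      · rintro (h | ⟨z, hz, hnc⟩)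
        · exact .inl h
        · exact .inr ⟨z, List.mem_cons_of_mem _ hz, hnc⟩
      · rintro (h | ⟨z, hz, hnc⟩)
        · exact .inl h
        · rcases List.mem_cons.mp hz with rfl | hz
          · exact absurd hc hnc
          · exact .inr ⟨z, hz, hnc⟩
    · have hstep : pvInnerF C s1 st y = (PySem.Set.add st.1 (pvInterA s1 y), true) := by
        simp [pvInnerF, hc]
      rw [hstep]
      constructor
      · intro _; exact .inr ⟨y, List.mem_cons_self, hc⟩
      · intro _; exact .inl rfl

lemma pv_outer_mem (C : PySem.Set String) :
    ∀ (l : List String) (st : PySem.Set String × Bool) (t : String),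
      t ∈ (l.foldl (fun st s1 => C.foldl (pvInnerF C s1) st) st).1 ↔
        t ∈ st.1 ∨ ∃ x ∈ l, ∃ y ∈ C, t = pvInterA x y ∧ t ∉ C := by
  intro l
  induction l with
  | nil => simp
  | cons x l ih =>
    intro st t
    rw [List.foldl_cons, ih, pv_innerF_mem]
    constructor
    · rintro ((h | ⟨y, hy, ht, hnc⟩) | h)
      · exact .inl h
      · exact .inr ⟨x, List.mem_cons_self, y, hy, ht, hnc⟩
      · rcases h with ⟨z, hz, y, hy, ht, hnc⟩
        exact .inr ⟨z, List.mem_cons_of_mem _ hz, y, hy, ht, hnc⟩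
    · rintro (h | ⟨z, hz, y, hy, ht, hnc⟩)
      · exact .inl (.inl h)
      · rcases List.mem_cons.mp hz with rfl | hz
        · exact .inl (.inr ⟨y, hy, ht, hnc⟩)
        · exact .inr ⟨z, hz, y, hy, ht, hnc⟩

lemma pv_outer_flag (C : PySem.Set String) :
    ∀ (l : List String) (st : PySem.Set String × Bool),
      (l.foldl (fun st s1 => C.foldl (pvInnerF C s1) st) st).2 = true ↔
        st.2 = true ∨ ∃ x ∈ l, ∃ y ∈ C, pvInterA x y ∉ C := by
  intro l
  induction l with
  | nil => simp
  | cons x l ih =>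
    intro st
    rw [List.foldl_cons, ih, pv_innerF_flag]
    constructor
    · rintro ((h | ⟨y, hy, hnc⟩) | h)
      · exact .inl h
      · exact .inr ⟨x, List.mem_cons_self, y, hy, hnc⟩
      · rcases h with ⟨z, hz, y, hy, hnc⟩
        exact .inr ⟨z, List.mem_cons_of_mem _ hz, y, hy, hnc⟩
    · rintro (h | ⟨z, hz, y, hy, hnc⟩)
      · exact .inl (.inl h)
      · rcases List.mem_cons.mp hz with rfl | hz
        · exact .inl (.inr ⟨y, hy, hnc⟩)
        · exact .inr ⟨z, hz, y, hy, hnc⟩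

lemma pv_passA_mem (C : PySem.Set String) (t : String) :
    t ∈ (pvPassA C).1 ↔ ∃ x ∈ C, ∃ y ∈ C, t = pvInterA x y ∧ t ∉ C := by
  rw [pv_passA_eq, pv_outer_mem]
  simp [PySem.Set.empty]

lemma pv_passA_flag (C : PySem.Set String) :
    (pvPassA C).2 = true ↔ ∃ x ∈ C, ∃ y ∈ C, pvInterA x y ∉ C := by
  rw [pv_passA_eq, pv_outer_flag]
  simp

def pvClosedL (C : List String) : Prop := ∀ x ∈ C, ∀ y ∈ C, pvInterA x y ∈ C

def pvInvA (sets C : List String) : Prop :=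
  C.Nodup ∧ (∀ s ∈ sets, s ∈ C) ∧ ∀ x ∈ C, pvDer sets x

lemma pv_der_shape {sets : List String} {x : String} (h : pvDer sets x) :
    x ∈ sets ∨ (pvCanon x ∧ ∀ c ∈ x.toList, c ∈ sets.flatMap String.toList) := by
  induction h with
  | base h => exact .inl h
  | step hx hy ihx ihy =>
    right
    refine ⟨pv_canon_interA _ _, ?_⟩
    intro c hc
    rw [pv_mem_interA] at hc
    rcases ihx with hx' | ⟨_, hch⟩
    · exact List.mem_flatMap.mpr ⟨_, hx', hc.1⟩
    · exact hch _ hc.1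

def pvU (sets : List String) : List Char :=
  PySem.List.sorted (PySem.Set.ofList (sets.flatMap String.toList)) (fun c => c) false

def pvCand (sets : List String) : List String :=
  PySem.Set.ofList sets ++ (pvU sets).sublists.map String.ofList

lemma pv_sublist_of_canon {l₁ l₂ : List Char} (h1 : l₁.Pairwise (· < ·))
    (h2 : l₂.Pairwise (· < ·)) (hs : l₁ ⊆ l₂) : l₁.Sublist l₂ := by
  induction l₂ generalizing l₁ with
  | nil => simpa using List.subset_nil.mp hs
  | cons b l₂ ih =>
    cases l₁ with
    | nil => exact List.nil_sublist _
    | cons a l₁ =>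
      by_cases hab : a = b
      · subst hab
        refine List.Sublist.cons₂ _ (ih h1.tail h2.tail ?_)
        intro c hc
        have hac : a < c := (List.pairwise_cons.mp h1).1 c hc
        rcases List.mem_cons.mp (hs (List.mem_cons_of_mem _ hc)) with rfl | h
        · exact absurd hac (lt_irrefl _)
        · exact h
      · have ha : a ∈ l₂ := by
          rcases List.mem_cons.mp (hs List.mem_cons_self) with h | h
          · exact absurd h hab
          · exact h
        have hba : b < a := (List.pairwise_cons.mp h2).1 a ha
        refine List.Sublist.cons _ (ih h1 h2.tail ?_)
        intro c hc
        have hbc : b < c := by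
          rcases List.mem_cons.mp hc with rfl | h
          · exact hba
          · exact lt_trans hba ((List.pairwise_cons.mp h1).1 c h)
        rcases List.mem_cons.mp (hs hc) with rfl | h
        · exact absurd hbc (lt_irrefl _)
        · exact h

lemma pv_card_bound {sets C : List String} (h : pvInvA sets C) :
    C.length ≤ (pvCand sets).length := by
  refine List.Subperm.length_le (List.Nodup.subperm h.1 ?_)
  intro x hx
  rcases pv_der_shape (h.2.2 x hx) with hxs | ⟨hc, hch⟩
  · exact List.mem_append_left _ ((PySem.Set.mem_ofList _ _).mpr hxs)
  · refine List.mem_append_right _ ?_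
    have hU : (pvU sets).Pairwise (· < ·) := PySem.List.sorted_ofList_pairwise_lt _
    have hsub : x.toList ⊆ pvU sets := by
      intro c hcx
      unfold pvU
      rw [PySem.List.mem_sorted, PySem.Set.mem_ofList]
      exact hch c hcx
    have : x.toList ∈ (pvU sets).sublists :=
      List.mem_sublists.mpr (pv_sublist_of_canon hc hU hsub)
    have := List.mem_map_of_mem (f := String.ofList) this
    rwa [String.ofList_toList] at this

lemma pv_ofList_len_le (xs : List String) : (PySem.Set.ofList xs).length ≤ xs.length := by
  have key : ∀ (l : List String) (s : PySem.Set String),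
      (List.foldl PySem.Set.add s l).length ≤ s.length + l.length := by
    intro l
    induction l with
    | nil => simp
    | cons x l ih =>
      intro s
      rw [List.foldl_cons, List.length_cons]
      refine le_trans (ih _) ?_
      have hadd : (PySem.Set.add s x).length ≤ s.length + 1 := by
        unfold PySem.Set.add
        split
        · omega
        · simp
      omega
  simpa using key xs PySem.Set.empty

lemma pv_cand_len (sets : List String) :
    (pvCand sets).length ≤ sets.length + 2 ^ (PySem.Set.ofList (sets.flatMap String.toList)).length := by
  unfold pvCand
  rw [List.length_append, List.length_map, List.length_sublists]
  have h1 := pv_ofList_len_le sets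
  have h2 : (pvU sets).length = (PySem.Set.ofList (sets.flatMap String.toList)).length := by
    unfold pvU
    exact PySem.List.length_sorted _ _ _
  rw [h2]
  omega

lemma pv_loopA_spec (sets : List String) :
    ∀ (fuel : Nat) (C : PySem.Set String),
      pvInvA sets C → (pvCand sets).length + 1 ≤ C.length + fuel →
      pvInvA sets (pvLoopA fuel C) ∧ pvClosedL (pvLoopA fuel C) ∧
        ∀ x ∈ C, x ∈ pvLoopA fuel C := by
  intro fuel
  induction fuel with
  | zero =>
    intro C hInv hlen
    exact absurd (pv_card_bound hInv) (by omega)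
  | succ fuel ih =>
    intro C hInv hlen
    cases hp2 : (pvPassA C).2 with
    | false =>
      have hflag : ¬ ∃ x ∈ C, ∃ y ∈ C, pvInterA x y ∉ C := by
        intro h
        rw [← pv_passA_flag] at h
        simp [hp2] at h
      have hclosed : pvClosedL C := by
        intro x hx y hy
        by_contra hn
        exact hflag ⟨x, hx, y, hy, hn⟩
      have hnil : (pvPassA C).1 = [] := by
        rw [List.eq_nil_iff_forall_not_mem]
        intro t ht
        rcases (pv_passA_mem C t).mp ht with ⟨x, hx, y, hy, rfl, hnc⟩
        exact hnc (hclosed x hx y hy)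
      have hred : pvLoopA (fuel + 1) C = C := by
        show (if (pvPassA C).2 then pvLoopA fuel (PySem.Set.update C (pvPassA C).1)
              else PySem.Set.update C (pvPassA C).1) = C
        rw [hp2, hnil]
        simp [PySem.Set.update]
      rw [hred]
      exact ⟨hInv, hclosed, fun x hx => hx⟩
    | true =>
      have hred : pvLoopA (fuel + 1) C = pvLoopA fuel (PySem.Set.update C (pvPassA C).1) := by
        show (if (pvPassA C).2 then pvLoopA fuel (PySem.Set.update C (pvPassA C).1)
              else PySem.Set.update C (pvPassA C).1) = _
        rw [hp2]
        simp
      set C' := PySem.Set.update C (pvPassA C).1 with hC'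
      have hsubC : ∀ x ∈ C, x ∈ C' := fun x hx => (PySem.Set.mem_update _ _ _).mpr (.inl hx)
      have hInv' : pvInvA sets C' := by
        refine ⟨PySem.Set.nodup_update _ _ hInv.1, fun s hs => hsubC s (hInv.2.1 s hs), ?_⟩
        intro x hx
        rcases (PySem.Set.mem_update _ _ _).mp hx with hx | hx
        · exact hInv.2.2 x hx
        · rcases (pv_passA_mem C x).mp hx with ⟨a, ha, b, hb, rfl, _⟩
          exact pvDer.step (hInv.2.2 a ha) (hInv.2.2 b hb)
      have hgrow : C.length + 1 ≤ C'.length := by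
        rcases (pv_passA_flag C).mp hp2 with ⟨a, ha, b, hb, hnc⟩
        have htmem : pvInterA a b ∈ (pvPassA C).1 :=
          (pv_passA_mem C _).mpr ⟨a, ha, b, hb, rfl, hnc⟩
        have hsub2 : (pvInterA a b :: C) ⊆ C' := by
          intro z hz
          rcases List.mem_cons.mp hz with rfl | hz
          · exact (PySem.Set.mem_update _ _ _).mpr (.inr htmem)
          · exact hsubC z hz
        have hnd : (pvInterA a b :: C).Nodup := List.nodup_cons.mpr ⟨hnc, hInv.1⟩
        have := List.Subperm.length_le (List.Nodup.subperm hnd hsub2)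
        simpa using this
      rw [hred]
      obtain ⟨h1, h2, h3⟩ := ih C' hInv' (by omega)
      exact ⟨h1, h2, fun x hx => h3 x (hsubC x hx)⟩

-- ---------- B side ----------

def pvInvB (sets closed : List String) : Prop :=
  closed.Nodup ∧ (∀ g ∈ closed, pvCanon g ∧ pvDer sets g) ∧
    ∀ a ∈ closed, ∀ b ∈ closed, pvInterA a b ∈ closed

lemma pv_stepB_inv {sets : List String} {closed : PySem.Set String} {s : String}
    (hs : s ∈ sets) (h : pvInvB sets closed) :
    pvInvB sets (pvStepB closed s) ∧ pvNormB s ∈ pvStepB closed s ∧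
      ∀ g ∈ closed, g ∈ pvStepB closed s := by
  by_cases hc : pvNormB s ∈ closed
  · have hred : pvStepB closed s = closed := by
      simp [pvStepB, hc]
    rw [hred]
    exact ⟨h, hc, fun g hg => hg⟩
  · set f := pvNormB s with hf
    have hred : pvStepB closed s =
        PySem.Set.update (PySem.Set.add closed f) (closed.map (fun g => pvInterB f g)) := by
      simp [pvStepB, ← hf, hc]
    have hmem : ∀ t, t ∈ pvStepB closed s ↔
        t ∈ closed ∨ t = f ∨ ∃ g ∈ closed, t = pvInterA f g := by
      intro t
      rw [hred, PySem.Set.mem_update, PySem.Set.mem_add, pvInterB_eq_pvInterA, List.mem_map]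
      constructor
      · rintro ((h | h) | ⟨g, hg, rfl⟩)
        · exact .inl h
        · exact .inr (.inl h)
        · exact .inr (.inr ⟨g, hg, rfl⟩)
      · rintro (h | h | ⟨g, hg, rfl⟩)
        · exact .inl (.inl h)
        · exact .inl (.inr h)
        · exact .inr ⟨g, hg, rfl⟩
    have hfc : pvCanon f := pv_canon_normB s
    have hfd : pvDer sets f := by
      have : pvInterA s s = f := pv_interA_norm_self s
      rw [← this]
      exact pvDer.step (pvDer.base hs) (pvDer.base hs)
    refine ⟨⟨?_, ?_, ?_⟩, ?_, ?_⟩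
    · rw [hred]
      exact PySem.Set.nodup_update _ _ (PySem.Set.nodup_add _ _ h.1)
    · intro g hg
      rcases (hmem g).mp hg with hg | rfl | ⟨g', hg', rfl⟩
      · exact h.2.1 g hg
      · exact ⟨hfc, hfd⟩
      · exact ⟨pv_canon_interA _ _, pvDer.step hfd (h.2.1 g' hg').2⟩
    · -- intersection-closedness of the updated collection
      intro a ha b hb
      rw [hmem] at ha hb ⊢
      rcases ha with ha | rfl | ⟨g1, hg1, rfl⟩
      · rcases hb with hb | rfl | ⟨g2, hg2, rfl⟩
        · exact .inl (h.2.2 a ha b hb)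
        · -- a ∩ f = f ∩ a
          exact .inr (.inr ⟨a, ha, pv_interA_comm a f⟩)
        · -- a ∩ (f ∩ g2) = f ∩ (a ∩ g2)
          exact .inr (.inr ⟨pvInterA a g2, h.2.2 a ha g2 hg2, pv_interA_rot1 a f g2⟩)
      · rcases hb with hb | rfl | ⟨g2, hg2, rfl⟩
        · -- f ∩ b
          exact .inr (.inr ⟨b, hb, rfl⟩)
        · -- f ∩ f = f
          exact .inr (.inl (pv_interA_self_of_canon hfc))
        · -- f ∩ (f ∩ g2) = f ∩ g2
          exact .inr (.inr ⟨g2, hg2, pv_interA_absorb f g2⟩)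
      · rcases hb with hb | rfl | ⟨g2, hg2, rfl⟩
        · -- (f ∩ g1) ∩ b = f ∩ (g1 ∩ b)
          exact .inr (.inr ⟨pvInterA g1 b, h.2.2 g1 hg1 b hb, pv_interA_rot2 f g1 b⟩)
        · -- (f ∩ g1) ∩ f = f ∩ g1
          exact .inr (.inr ⟨g1, hg1, pv_interA_absorb2 f g1⟩)
        · -- (f ∩ g1) ∩ (f ∩ g2) = f ∩ (g1 ∩ g2)
          exact .inr (.inr ⟨pvInterA g1 g2, h.2.2 g1 hg1 g2 hg2, pv_interA_dist f g1 g2⟩)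
    · exact (hmem f).mpr (.inr (.inl rfl))
    · intro g hg
      exact (hmem g).mpr (.inl hg)

lemma pv_foldB_inv (sets : List String) :
    ∀ (l : List String) (closed : PySem.Set String),
      (∀ s ∈ l, s ∈ sets) → pvInvB sets closed →
      pvInvB sets (l.foldl pvStepB closed) ∧
        (∀ s ∈ l, pvNormB s ∈ l.foldl pvStepB closed) ∧
        ∀ g ∈ closed, g ∈ l.foldl pvStepB closed := by
  intro l
  induction l with
  | nil => intro closed _ h; exact ⟨h, by simp, fun g hg => hg⟩
  | cons s l ih =>
    intro closed hl h
    obtain ⟨h1, h2, h3⟩ := pv_stepB_inv (hl s List.mem_cons_self) h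
    rw [List.foldl_cons]
    obtain ⟨g1, g2, g3⟩ := ih _ (fun x hx => hl x (List.mem_cons_of_mem _ hx)) h1
    refine ⟨g1, ?_, fun g hg => g3 g (h3 g hg)⟩
    intro x hx
    rcases List.mem_cons.mp hx with rfl | hx
    · exact g3 _ h2
    · exact g2 x hx

lemma pv_B_char (sets : List String) :
    pvInvB sets (sets.foldl pvStepB PySem.Set.empty) ∧
      ∀ s ∈ sets, pvNormB s ∈ sets.foldl pvStepB PySem.Set.empty := by
  have h0 : pvInvB sets PySem.Set.empty := by
    refine ⟨List.nodup_nil, ?_, ?_⟩ <;> simp [PySem.Set.empty]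
  obtain ⟨h1, h2, _⟩ := pv_foldB_inv sets sets PySem.Set.empty (fun _ h => h) h0
  exact ⟨h1, h2⟩

lemma pv_der_norm_mem {sets : List String} {x : String} (h : pvDer sets x) :
    pvNormB x ∈ sets.foldl pvStepB PySem.Set.empty := by
  induction h with
  | base hs => exact (pv_B_char sets).2 _ hs
  | step hx hy ihx ihy =>
    rw [pv_normB_interA]
    exact (pv_B_char sets).1.2.2 _ ihx _ ihy

lemma pv_B_mem (sets : List String) (t : String) :
    t ∈ PySem.Set.union (PySem.Set.ofList sets) (sets.foldl pvStepB PySem.Set.empty) ↔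
      pvDer sets t := by
  rw [PySem.Set.mem_union, PySem.Set.mem_ofList]
  constructor
  · rintro (h | h)
    · exact pvDer.base h
    · exact ((pv_B_char sets).1.2.1 t h).2
  · intro h
    cases h with
    | base hs => exact .inl hs
    | step hx hy =>
      right
      have := pv_der_norm_mem (pvDer.step hx hy)
      rwa [pv_normB_canon_fix (pv_canon_interA _ _)] at this

-- ---------- final assembly ----------

def pvKey (x : String) : Lex (Int × String) := toLex (PySem.Str.len x, x)

lemma pvKey_inj : Function.Injective pvKey := by
  intro x y h
  have := congrArg (fun p => (ofLex p).2) h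
  simpa [pvKey] using this

lemma pv_sorted2_eq_sorted_lex (xs : List String) :
    PySem.List.sorted2 xs PySem.Str.len (fun x => x) false =
      PySem.List.sorted xs pvKey false := by
  have hbef : (fun a b : String =>
      decide (PySem.Str.len a < PySem.Str.len b) ||
        (!decide (PySem.Str.len b < PySem.Str.len a) && decide (a < b))) =
      fun a b : String => decide (pvKey a < pvKey b) := by
    funext a b
    rcases lt_trichotomy (PySem.Str.len a) (PySem.Str.len b) with h | h | h
    · have d1 : decide (PySem.Str.len a < PySem.Str.len b) = true := decide_eq_true h
      have d2 : decide (pvKey a < pvKey b) = true :=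
        decide_eq_true (by rw [pvKey, pvKey, Prod.Lex.lt_iff]; exact .inl h)
      rw [d1, d2, Bool.true_or]
    · have d1 : decide (PySem.Str.len a < PySem.Str.len b) = false :=
        decide_eq_false (by omega)
      have d2 : decide (PySem.Str.len b < PySem.Str.len a) = false :=
        decide_eq_false (by omega)
      have hiff : (pvKey a < pvKey b) ↔ (a < b) := by
        rw [pvKey, pvKey, Prod.Lex.lt_iff]
        constructor
        · rintro (hx | ⟨_, hx⟩)
          · exfalso
            simp only [ofLex_toLex] at hx
            omega
          · exact hx
        · intro hx
          exact .inr ⟨h, hx⟩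
      rw [d1, d2, Bool.false_or, Bool.not_false, Bool.true_and]
      exact (decide_eq_decide.mpr hiff.symm)
    · have d1 : decide (PySem.Str.len a < PySem.Str.len b) = false :=
        decide_eq_false (by omega)
      have d2 : decide (PySem.Str.len b < PySem.Str.len a) = true := decide_eq_true h
      have d3 : decide (pvKey a < pvKey b) = false := by
        refine decide_eq_false ?_
        rw [pvKey, pvKey, Prod.Lex.lt_iff]
        rintro (hx | ⟨hx, _⟩) <;> simp only [ofLex_toLex] at hx <;> omega
      rw [d1, d2, d3, Bool.false_or, Bool.not_true, Bool.false_and]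
  show xs.foldl (fun acc x => PySem.List.insertBy (fun a b : String =>
      decide (PySem.Str.len a < PySem.Str.len b) ||
        (!decide (PySem.Str.len b < PySem.Str.len a) && decide (a < b))) x acc) [] =
    xs.foldl (fun acc x => PySem.List.insertBy
      (fun a b : String => decide (pvKey a < pvKey b)) x acc) []
  rw [hbef]

lemma pvKey_min (y : String) : pvKey "" ≤ pvKey y := by
  rcases Nat.eq_zero_or_pos y.toList.length with h0 | hpos
  · have hy : y = "" := by
      have h := String.ofList_toList (s := y)
      rw [List.length_eq_zero_iff.mp h0] at h
      exact h.symm.trans rfl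
    rw [hy]
  · rw [pvKey, pvKey, Prod.Lex.le_iff]
    left
    show PySem.Str.len "" < PySem.Str.len y
    have he : ("" : String).toList = [] := by decide
    unfold PySem.Str.len
    rw [he]
    simp
    exact_mod_cast hpos

lemma pv_main (sets : List String) : intersection_closure sets = intersection_closure_alt sets := by
  by_cases hs : sets = []
  · simp [intersection_closure, intersection_closure_alt, hs]
  · set fuel := sets.length + 2 ^ (PySem.Set.ofList (sets.flatMap String.toList)).length + 1 with hfueldef
    set RA := pvLoopA fuel (PySem.Set.ofList sets) with hRA
    set RB := PySem.Set.union (PySem.Set.ofList sets) (sets.foldl pvStepB PySem.Set.empty) with hRB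
    set outA := PySem.List.sorted2 RA PySem.Str.len (fun x => x) false with houtA
    set out := PySem.List.sorted2 RB PySem.Str.len (fun x => x) false with hout
    have hA : intersection_closure sets =
        (if PySem.List.pyGetD outA 0 "" ≠ "" then "" :: outA else outA) := by
      unfold intersection_closure
      rw [if_neg hs]
    have hB : intersection_closure_alt sets =
        (if PySem.Set.contains RB "" then out else "" :: out) := by
      unfold intersection_closure_alt
      rw [if_neg hs]
    -- A's result characterization
    have hInv0 : pvInvA sets (PySem.Set.ofList sets) :=
      ⟨PySem.Set.nodup_ofList sets, fun s h => (PySem.Set.mem_ofList _ _).mpr h,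
       fun x hx => pvDer.base ((PySem.Set.mem_ofList _ _).mp hx)⟩
    have hfuelBig : (pvCand sets).length + 1 ≤ (PySem.Set.ofList sets).length + fuel := by
      have := pv_cand_len sets
      omega
    obtain ⟨hInvA, hclosedA, hsubA⟩ := pv_loopA_spec sets fuel (PySem.Set.ofList sets) hInv0 hfuelBig
    rw [← hRA] at hInvA hclosedA hsubA
    have hAmem : ∀ t, t ∈ RA ↔ pvDer sets t := by
      intro t
      constructor
      · intro h
        exact hInvA.2.2 t h
      · intro h
        induction h with
        | base h => exact hsubA _ ((PySem.Set.mem_ofList _ _).mpr h)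
        | step hx hy ihx ihy => exact hclosedA _ ihx _ ihy
    have hRBnodup : RB.Nodup := PySem.Set.nodup_update _ _ (PySem.Set.nodup_ofList sets)
    have hperm : RA.Perm RB :=
      (List.perm_ext_iff_of_nodup hInvA.1 hRBnodup).mpr
        (fun t => (hAmem t).trans (pv_B_mem sets t).symm)
    have hsorteq : outA = out := by
      rw [houtA, hout, pv_sorted2_eq_sorted_lex, pv_sorted2_eq_sorted_lex]
      exact PySem.List.sorted_eq_sorted_of_perm _ _ _ pvKey_inj hperm
    -- the branch conditions agree
    have houtmem : ∀ t, t ∈ out ↔ t ∈ RB := fun t => by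
      rw [hout]
      exact (PySem.List.sorted2_perm _ _ _ _).mem_iff
    have houtne : out ≠ [] := by
      obtain ⟨s0, hs0⟩ := List.exists_mem_of_ne_nil sets hs
      intro h
      have h0 : s0 ∈ RB := by
        rw [hRB, PySem.Set.mem_union, PySem.Set.mem_ofList]
        exact .inl hs0
      rw [← houtmem, h] at h0
      simp at h0
    obtain ⟨m, t, hmt⟩ := List.exists_cons_of_ne_nil houtne
    rw [hA, hB, hsorteq]
    by_cases hempty : "" ∈ RB
    · have hcon : PySem.Set.contains RB "" = true := (PySem.Set.contains_iff _ _).mpr hempty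
      have hm : m = "" := by
        have hsortedform : PySem.List.sorted RB pvKey = m :: t := by
          rw [← pv_sorted2_eq_sorted_lex, ← hout, hmt]
        have h1 : pvKey m ≤ pvKey "" :=
          PySem.List.key_head_sorted_le RB pvKey hsortedform "" hempty
        have h2 : pvKey "" ≤ pvKey m := pvKey_min m
        exact pvKey_inj (le_antisymm h1 h2)
      rw [hmt, hm, hcon]
      simp
    · have hcon : PySem.Set.contains RB "" = false :=
        Bool.eq_false_iff.mpr (fun h' => hempty ((PySem.Set.contains_iff _ _).mp h'))
      have hm : m ≠ "" := by
        intro h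
        apply hempty
        rw [← houtmem, hmt]
        rw [h] at hmt ⊢
        exact List.mem_cons_self
      rw [hmt, hcon]
      simp [hm]

-- ===== VERDICT (by name: the statement is the Claim_ definition above) =====
theorem intersection_closure_spec : Claim_equal_intersection_closure := by
  intro sets _
  unfold Spec_intersection_closure
  exact pv_main sets
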